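-- pv_equiv track=rewrite | github.com/cg-jl/advent-of-code | 2021/python/day9.py | basins
-- ===== SOURCE A (Python) =====
-- NEIGHBOR_DIRECTIONS = {(-1, -1), (-1, 0), (-1, 1),
--                            (0, -1),           (0, 1),
--                            (1, -1), (1, 0), (1, 1)}
--
-- def low_points(contents):
--     for i in range(len(contents)):
--         for j in range(len(contents[i])):
--             neighbor_count = 8
--             lt_count = 0
--
--             for di, dj in NEIGHBOR_DIRECTIONS:
--                 ii = i + di
--                 jj = j + dj
--                 if ii < 0 or ii == len(contents) or jj < 0 or jj == len(contents[i]):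
--                     neighbor_count -= 1
--                     continue
--
--                 lt_count += contents[ii][jj] > contents[i][j]
--
--
--             if lt_count == neighbor_count:
--                 yield contents[i][j], i, j
--
-- def exists(contents, i, j):
--     return i >= 0 and i != len(contents) and j >= 0 and j != len(contents[i])
--
-- def basins(contents):
--     visited = set()
--     for _, i, j in low_points(contents):
--         # start a flood fill to know the size
--         size = 0
--         queue = [(i, j)]
--         while queue:
--             i, j = queue.pop()
--             if contents[i][j] == 9 or (i, j) in visited:
--                 continue
--             visited.add((i, j))
--             queue += set((i + di, j + dj) for di, dj in {(-1, 0), (1, 0), (0, -1), (0, 1)} if exists(contents, i + di, j + dj))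
--             size += 1
--
--         yield size
-- ===== SOURCE B (Python) =====
-- # B: one labeling pass assigns every non-9 cell a component id and size; low points then
-- # just look up their label (0 for walls / already-seen labels) instead of re-flood-filling.
-- def _is_low(contents, i, j):
--     v = contents[i][j]
--     for di in (-1, 0, 1):
--         for dj in (-1, 0, 1):
--             if di == 0 and dj == 0:
--                 continue
--             ii, jj = i + di, j + dj
--             if 0 <= ii < len(contents) and 0 <= jj < len(contents[ii]):
--                 if not contents[ii][jj] > v:
--                     return False
--     return True
--
--
-- def basins(contents):
--     label = {}
--     sizes = []
--     for i in range(len(contents)):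
--         for j in range(len(contents[i])):
--             if contents[i][j] == 9 or (i, j) in label:
--                 continue
--             lid = len(sizes)
--             count = 0
--             stack = [(i, j)]
--             while stack:
--                 a, b = stack.pop()
--                 if contents[a][b] == 9 or (a, b) in label:
--                     continue
--                 label[(a, b)] = lid
--                 count += 1
--                 for di, dj in ((-1, 0), (1, 0), (0, -1), (0, 1)):
--                     aa, bb = a + di, b + dj
--                     if 0 <= aa < len(contents) and 0 <= bb < len(contents[aa]):
--                         stack.append((aa, bb))
--             sizes.append(count)
--     seen = set()
--     for i in range(len(contents)):
--         for j in range(len(contents[i])):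
--             if _is_low(contents, i, j):
--                 lid = label.get((i, j), -1)
--                 if lid == -1 or lid in seen:
--                     yield 0
--                 else:
--                     seen.add(lid)
--                     yield sizes[lid]
-- ===== Notes on version B (the rewrite author's own statement) =====
-- stated objective: alternative
-- what changed: Instead of running a fresh shared-visited flood fill from every low point, B labels all non-9 4-connected components of the grid in one pass (recording each component's size) and then answers each low point by an O(1) label lookup, yielding the size on a label's first occurrence and 0 on repeats.
import Mathlib
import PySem

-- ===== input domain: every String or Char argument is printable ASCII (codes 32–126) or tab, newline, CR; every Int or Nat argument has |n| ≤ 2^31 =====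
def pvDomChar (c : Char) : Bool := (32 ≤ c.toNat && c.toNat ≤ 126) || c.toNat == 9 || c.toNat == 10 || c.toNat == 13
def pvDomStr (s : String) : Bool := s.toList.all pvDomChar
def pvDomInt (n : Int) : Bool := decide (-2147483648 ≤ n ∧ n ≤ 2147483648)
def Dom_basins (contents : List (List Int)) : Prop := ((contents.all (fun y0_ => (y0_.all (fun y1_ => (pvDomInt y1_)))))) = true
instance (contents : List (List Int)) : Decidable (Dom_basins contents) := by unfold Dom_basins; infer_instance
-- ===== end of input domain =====

-- B replaces A's per-low-point shared-visited flood fills by ONE component-labelling pass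
-- plus O(1) label/size lookups per low point (objective: alternative algorithm, similar cost).
-- Equivalence is about return values; neither version mutates its argument.

-- The 8 neighbour directions (A iterates a Python set of them; all uses are order-independent counts).
def pvDirs8 : List (Int × Int) :=
  [(-1, -1), (-1, 0), (-1, 1), (0, -1), (0, 1), (1, -1), (1, 0), (1, 1)]

-- ===== PORT A =====
-- one step of A's low_points neighbour loop: state (neighbor_count, lt_count)
def pvLowStepA (g : List (List Int)) (i j : Int) (acc : Int × Int) (d : Int × Int) : Int × Int :=
  let ii := i + d.1
  let jj := j + d.2
  if ii < 0 ∨ ii = (g.length : Int) ∨ jj < 0 ∨ jj = ((PySem.List.pyGetD g i []).length : Int) then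
    (acc.1 - 1, acc.2)
  else
    (acc.1, acc.2 + (if PySem.List.pyGetD (PySem.List.pyGetD g ii []) jj 0 >
                        PySem.List.pyGetD (PySem.List.pyGetD g i []) j 0 then 1 else 0))

-- low_points' test at (i, j): lt_count == neighbor_count
def pvIsLowA (g : List (List Int)) (i j : Int) : Bool :=
  let r := pvDirs8.foldl (pvLowStepA g i j) (8, 0)
  r.2 == r.1

-- A's exists(contents, i, j)
def pvExistsA (g : List (List Int)) (i j : Int) : Bool :=
  decide (0 ≤ i) && !(i == (g.length : Int)) && decide (0 ≤ j)
    && !(j == ((PySem.List.pyGetD g i []).length : Int))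

-- the 4-neighbour candidates A pushes (Python builds a set of these distinct cells;
-- its iteration order does not affect the flood's visited set or size)
def pvNbrsA (g : List (List Int)) (c : Int × Int) : List (Int × Int) :=
  [(c.1 - 1, c.2), (c.1 + 1, c.2), (c.1, c.2 - 1), (c.1, c.2 + 1)].filter
    (fun d => pvExistsA g d.1 d.2)

-- row-major cells of the grid (the i, j double loop)
def pvCells (g : List (List Int)) : List (Int × Int) :=
  (PySem.List.pyRange 0 g.length 1).flatMap
    (fun i => (PySem.List.pyRange 0 ((PySem.List.pyGetD g i []).length : Int) 1).map (fun j => (i, j)))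

-- A's flood-fill while-loop.  Python pops from the end of the list and appends a set of
-- neighbours; the visited set and the size are independent of that order, so the port
-- pops the head and prepends the neighbour candidates.  The Nat argument is pure fuel:
-- callers pass 4 * |cells| + 1, which pvFloodA_run proves is never exhausted.
def pvFloodA (g : List (List Int)) : Nat → PySem.Set (Int × Int) → List (Int × Int) → Int →
    PySem.Set (Int × Int) × Int
  | _, visited, [], size => (visited, size)
  | 0, visited, _, size => (visited, size)   -- fuel never runs out (pvFloodA_run)
  | fuel + 1, visited, c :: rest, size =>
    match PySem.List.pyGet? g c.1 with
    | none => pvFloodA g fuel visited rest size      -- Python raises here; outside Pre_basins only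
    | some row =>
      match PySem.List.pyGet? row c.2 with
      | none => pvFloodA g fuel visited rest size    -- Python raises here; outside Pre_basins only
      | some v =>
        if v = 9 ∨ PySem.Set.contains visited c then
          pvFloodA g fuel visited rest size
        else
          pvFloodA g fuel (PySem.Set.add visited c) (pvNbrsA g c ++ rest) (size + 1)

def basins (contents : List (List Int)) : List Int :=
  ((pvCells contents).foldl
    (fun (st : PySem.Set (Int × Int) × List Int) c =>
      if pvIsLowA contents c.1 c.2 then
        let r := pvFloodA contents (4 * (pvCells contents).length + 1) st.1 [c] 0
        (r.1, st.2 ++ [r.2])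
      else st)
    (PySem.Set.empty, [])).2

-- ===== PORT B =====
-- B's "0 <= a < len(contents) and 0 <= b < len(contents[a])" bounds check followed by the lookup
def pvGetCellB (g : List (List Int)) (a b : Int) : Option Int :=
  if 0 ≤ a ∧ a < (g.length : Int) ∧ 0 ≤ b ∧ b < ((PySem.List.pyGetD g a []).length : Int) then
    some (PySem.List.pyGetD (PySem.List.pyGetD g a []) b 0)
  else none

-- B's _is_low: every in-bounds 8-neighbour is strictly greater
def pvIsLowB (g : List (List Int)) (i j : Int) : Bool :=
  pvDirs8.all (fun d =>
    match pvGetCellB g (i + d.1) (j + d.2) with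
    | none => true
    | some w => decide (w > PySem.List.pyGetD (PySem.List.pyGetD g i []) j 0))

-- the in-bounds 4-neighbours B pushes
def pvNbrsB (g : List (List Int)) (c : Int × Int) : List (Int × Int) :=
  [(c.1 - 1, c.2), (c.1 + 1, c.2), (c.1, c.2 - 1), (c.1, c.2 + 1)].filter
    (fun d => (pvGetCellB g d.1 d.2).isSome)

-- B's labelling flood: pops a cell, skips 9s and already-labelled cells, labels and counts.
-- (Python pops from the end; label/count are order-independent, the port pops the head.
--  The Nat argument is pure fuel: callers pass 4 * |cells| + 1, never exhausted — pvFloodB_run.)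
def pvFloodB (g : List (List Int)) (lid : Int) : Nat → PySem.Dict (Int × Int) Int →
    List (Int × Int) → Int → PySem.Dict (Int × Int) Int × Int
  | _, label, [], count => (label, count)
  | 0, label, _, count => (label, count)     -- fuel never runs out (pvFloodB_run)
  | fuel + 1, label, c :: rest, count =>
    match pvGetCellB g c.1 c.2 with
    | none => pvFloodB g lid fuel label rest count   -- never pushed: B only pushes in-bounds cells
    | some v =>
      if v = 9 ∨ label.contains c then
        pvFloodB g lid fuel label rest count
      else
        pvFloodB g lid fuel (label.insert c lid) (pvNbrsB g c ++ rest) (count + 1)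

def basins_alt (contents : List (List Int)) : List Int :=
  -- pass 1: label every non-9 component and record its size
  let p1 := (pvCells contents).foldl
    (fun (st : PySem.Dict (Int × Int) Int × List Int) c =>
      if PySem.List.pyGetD (PySem.List.pyGetD contents c.1 []) c.2 0 = 9 ∨ st.1.contains c then st
      else
        let r := pvFloodB contents (st.2.length : Int) (4 * (pvCells contents).length + 1) st.1 [c] 0
        (r.1, st.2 ++ [r.2]))
    (PySem.Dict.empty, [])
  let label := p1.1
  let sizes := p1.2
  -- pass 2: each low point looks its component up; first time yields the size, repeats yield 0
  ((pvCells contents).foldl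
    (fun (st : PySem.Set Int × List Int) c =>
      if pvIsLowB contents c.1 c.2 then
        let lid := label.getD c (-1)
        if lid = -1 ∨ PySem.Set.contains st.1 lid then (st.1, st.2 ++ [0])
        else (PySem.Set.add st.1 lid, st.2 ++ [PySem.List.pyGetD sizes lid 0])
      else st)
    (PySem.Set.empty, [])).2

-- ===== PRECONDITION & SPEC =====
-- Pre_ excludes ragged grids: there A raises IndexError (its neighbour bounds checks use the
-- wrong row's length), so it returns on exactly the rectangular grids admitted here.
def Pre_basins (contents : List (List Int)) : Prop :=
  ∀ row ∈ contents, row.length = (contents.headD []).length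
instance (contents : List (List Int)) : Decidable (Pre_basins contents) := by
  unfold Pre_basins; infer_instance

def pvWitness_basins : List (List Int) := [[1, 2, 9], [9, 3, 4]]

def Spec_basins (contents : List (List Int)) (out : List Int) : Prop := out = basins_alt contents
instance (contents : List (List Int)) (out : List Int) : Decidable (Spec_basins contents out) := by
  unfold Spec_basins; infer_instance

-- ===== CLAIM (what is proved, stated in full; the proofs are below) =====
def Claim_equal_basins : Prop :=
  ∀ (contents : List (List Int)), Dom_basins contents → Pre_basins contents →
    Spec_basins contents (basins contents)

-- ===== LEMMAS AND PROOFS =====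

-- ---- basic geometry ----
def pvInGrid (g : List (List Int)) (c : Int × Int) : Prop :=
  0 ≤ c.1 ∧ c.1 < (g.length : Int) ∧ 0 ≤ c.2 ∧ c.2 < ((PySem.List.pyGetD g c.1 []).length : Int)

def pvVal (g : List (List Int)) (c : Int × Int) : Int :=
  PySem.List.pyGetD (PySem.List.pyGetD g c.1 []) c.2 0

def pvOk (g : List (List Int)) (c : Int × Int) : Prop := pvInGrid g c ∧ pvVal g c ≠ 9

def pvStep (g : List (List Int)) (x y : Int × Int) : Prop :=
  pvOk g x ∧ pvOk g y ∧ y ∈ pvNbrsB g x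

def pvReach (g : List (List Int)) (s c : Int × Int) : Prop :=
  Relation.ReflTransGen (pvStep g) s c

theorem pvGetCellB_eq_some_iff {g : List (List Int)} {a b v : Int} :
    pvGetCellB g a b = some v ↔ pvInGrid g (a, b) ∧ pvVal g (a, b) = v := by
  unfold pvGetCellB pvInGrid pvVal
  split_ifs with h <;> simp_all

theorem pvGetCellB_isSome_iff {g : List (List Int)} {a b : Int} :
    (pvGetCellB g a b).isSome ↔ pvInGrid g (a, b) := by
  unfold pvGetCellB pvInGrid
  split_ifs with h <;> simp_all

theorem pvMem_cells {g : List (List Int)} {c : Int × Int} :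
    c ∈ pvCells g ↔ pvInGrid g c := by
  simp only [pvCells, List.mem_flatMap, List.mem_map, PySem.List.mem_pyRange_one]
  constructor
  · rintro ⟨i, hi, j, hj, rfl⟩
    exact ⟨hi.1, hi.2, hj.1, hj.2⟩
  · rintro ⟨h1, h2, h3, h4⟩
    exact ⟨c.1, ⟨h1, h2⟩, c.2, ⟨h3, h4⟩, rfl⟩

theorem pvMem_nbrsB {g : List (List Int)} {c d : Int × Int} :
    d ∈ pvNbrsB g c ↔ pvInGrid g d ∧
      (d = (c.1 - 1, c.2) ∨ d = (c.1 + 1, c.2) ∨ d = (c.1, c.2 - 1) ∨ d = (c.1, c.2 + 1)) := by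
  simp only [pvNbrsB, List.mem_filter, List.mem_cons, List.not_mem_nil, or_false]
  rw [pvGetCellB_isSome_iff]
  tauto

theorem pvStep_symm {g : List (List Int)} {x y : Int × Int} (h : pvStep g x y) : pvStep g y x := by
  obtain ⟨hx, hy, hm⟩ := h
  refine ⟨hy, hx, ?_⟩
  rw [pvMem_nbrsB] at hm ⊢
  refine ⟨hx.1, ?_⟩
  obtain ⟨a, b⟩ := x
  obtain ⟨-, h | h | h | h⟩ := hm <;> subst h <;> simp

theorem pvReach_symm {g : List (List Int)} {s c : Int × Int} (h : pvReach g s c) :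
    pvReach g c s :=
  Relation.ReflTransGen.symmetric (fun _ _ hxy => pvStep_symm hxy) h

theorem pvReach_ok {g : List (List Int)} {s c : Int × Int} (h : pvReach g s c)
    (hs : pvOk g s) : pvOk g c := by
  induction h with
  | refl => exact hs
  | tail _ hstep _ => exact hstep.2.1

theorem pvReach_closed {g : List (List Int)} {V : List (Int × Int)}
    (hcl : ∀ c ∈ V, ∀ d, pvStep g c d → d ∈ V) {x y : Int × Int}
    (hx : x ∈ V) (h : pvReach g x y) : y ∈ V := by
  induction h with
  | refl => exact hx
  | tail _ hstep ih => exact hcl _ ih _ hstep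

theorem pvRow_mem {g : List (List Int)} {i : Int} (h0 : 0 ≤ i) (h1 : i < (g.length : Int)) :
    PySem.List.pyGetD g i [] ∈ g := by
  rw [PySem.List.pyGetD_eq_getElem g [] h0 h1]; exact List.getElem_mem _

-- under Pre_, every row in range has the same length
theorem pvPre_width {g : List (List Int)} (hPre : Pre_basins g) {i i' : Int}
    (h0 : 0 ≤ i) (h1 : i < (g.length : Int)) (h0' : 0 ≤ i') (h1' : i' < (g.length : Int)) :
    (PySem.List.pyGetD g i []).length = (PySem.List.pyGetD g i' []).length := by
  rw [hPre _ (pvRow_mem h0 h1), hPre _ (pvRow_mem h0' h1')]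

theorem pvGet_resolve {g : List (List Int)} {c : Int × Int} (h : pvInGrid g c) :
    PySem.List.pyGet? g c.1 = some (PySem.List.pyGetD g c.1 []) ∧
      PySem.List.pyGet? (PySem.List.pyGetD g c.1 []) c.2 = some (pvVal g c) := by
  obtain ⟨h1, h2, h3, h4⟩ := h
  constructor
  · rw [PySem.List.pyGet?_eq_some_getElem g h1 h2, PySem.List.pyGetD_eq_getElem g [] h1 h2]
  · rw [PySem.List.pyGet?_eq_some_getElem _ h3 h4, pvVal,
      PySem.List.pyGetD_eq_getElem _ 0 h3 h4]

-- a countP strictly drops when one satisfying element stops satisfying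
theorem pvCountP_succ_le {α : Type} {l : List α} {p q : α → Bool}
    (hpq : ∀ a ∈ l, q a = true → p a = true) {c : α} (hc : c ∈ l) (hp : p c = true)
    (hq : ¬ q c = true) : l.countP q + 1 ≤ l.countP p := by
  obtain ⟨l₁, l₂, rfl⟩ := List.append_of_mem hc
  have hq' : q c = false := by simpa using hq
  simp [List.countP_append, List.countP_cons, hp, hq']
  have t1 : l₁.countP q ≤ l₁.countP p :=
    List.countP_mono_left (fun x hx => hpq x (by simp [hx]))
  have t2 : l₂.countP q ≤ l₂.countP p :=
    List.countP_mono_left (fun x hx => hpq x (by simp [hx]))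
  omega

-- two nodup lists with the same members have the same length
theorem pvLength_eq_of_mem_iff {α : Type} [DecidableEq α] {l1 l2 : List α}
    (h1 : l1.Nodup) (h2 : l2.Nodup) (h : ∀ x, x ∈ l1 ↔ x ∈ l2) : l1.length = l2.length :=
  ((List.perm_ext_iff_of_nodup h1 h2).mpr h).length_eq



-- ---- characterization of A's flood fill ----
structure PvFloodOut (g : List (List Int)) (V : PySem.Set (Int × Int))
    (Q : List (Int × Int)) (n : Int) (r : PySem.Set (Int × Int) × Int) : Prop where
  nd : r.1.Nodup
  mono : ∀ x ∈ V, x ∈ r.1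
  src : ∀ c ∈ r.1, c ∈ V ∨ ∃ q ∈ Q, pvOk g q ∧ pvReach g q c
  done : ∀ q ∈ Q, pvOk g q → q ∈ r.1
  closed : ∀ c ∈ r.1, c ∉ V → ∀ d, pvStep g c d → d ∈ r.1
  okNew : ∀ c ∈ r.1, c ∉ V → pvOk g c
  card : V.length ≤ r.1.length ∧ r.2 = n + ((r.1.length - V.length : Nat) : Int)

theorem pvFloodA_nil {g : List (List Int)} {fuel : Nat} {V : PySem.Set (Int × Int)} {n : Int} :
    pvFloodA g fuel V [] n = (V, n) := by cases fuel <;> rfl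

theorem pvFloodOut_self {g : List (List Int)} {V : PySem.Set (Int × Int)} {n : Int}
    (hnd : V.Nodup) : PvFloodOut g V [] n (V, n) := by
  refine ⟨hnd, fun x hx => hx, fun c hc => Or.inl hc, by simp, fun c _ hc => absurd ‹c ∈ V› hc,
    fun c _ hc => absurd ‹c ∈ V› hc, le_refl _, by simp⟩

theorem pvExistsA_eq_isSome {g : List (List Int)} {a b : Int}
    (hd2 : a ≤ (g.length : Int))
    (hbw : 0 ≤ a → a < (g.length : Int) → b ≤ ((PySem.List.pyGetD g a []).length : Int)) :
    pvExistsA g a b = (pvGetCellB g a b).isSome := by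
  unfold pvExistsA pvGetCellB
  split_ifs with h
  · simp only [Option.isSome_some, Bool.and_eq_true, Bool.not_eq_true', beq_eq_false_iff_ne,
      ne_eq, decide_eq_true_eq]
    refine ⟨⟨⟨h.1, by omega⟩, h.2.2.1⟩, by omega⟩
  · simp only [Option.isSome_none]
    rw [Bool.eq_false_iff]
    intro hc
    simp only [Bool.and_eq_true, Bool.not_eq_true', beq_eq_false_iff_ne, ne_eq,
      decide_eq_true_eq] at hc
    obtain ⟨⟨⟨ha0, hane⟩, hb0⟩, hbne⟩ := hc
    have ha1 : a < (g.length : Int) := by omega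
    have := hbw ha0 ha1
    exact h ⟨ha0, ha1, hb0, by omega⟩

theorem pvNbrsA_eq_nbrsB {g : List (List Int)} (hPre : Pre_basins g) {c : Int × Int}
    (hc : pvInGrid g c) : pvNbrsA g c = pvNbrsB g c := by
  obtain ⟨h1, h2, h3, h4⟩ := hc
  have hw : ∀ a : Int, 0 ≤ a → a < (g.length : Int) →
      ((PySem.List.pyGetD g a []).length : Int) = ((PySem.List.pyGetD g c.1 []).length : Int) := by
    intro a ha0 ha1
    exact_mod_cast pvPre_width hPre ha0 ha1 h1 h2
  unfold pvNbrsA pvNbrsB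
  apply List.filter_congr
  intro d hd
  simp only [List.mem_cons, List.not_mem_nil, or_false] at hd
  rcases hd with h | h | h | h <;> subst h <;>
    refine pvExistsA_eq_isSome (by omega) (fun ha0 ha1 => by rw [hw _ ha0 ha1]; omega)

theorem pvNbrsA_len_le {g : List (List Int)} (c : Int × Int) : (pvNbrsA g c).length ≤ 4 := by
  have := List.length_filter_le (fun d => pvExistsA g d.1 d.2)
    [(c.1 - 1, c.2), (c.1 + 1, c.2), (c.1, c.2 - 1), (c.1, c.2 + 1)]
  simpa [pvNbrsA] using this

theorem pvFloodA_spec {g : List (List Int)} (hPre : Pre_basins g) :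
    ∀ (fuel : Nat) (V : PySem.Set (Int × Int)) (Q : List (Int × Int)) (n : Int),
      V.Nodup → (∀ c ∈ Q, pvInGrid g c) →
      4 * ((pvCells g).countP (fun x => !(PySem.Set.contains V x))) + Q.length ≤ fuel →
      PvFloodOut g V Q n (pvFloodA g fuel V Q n) := by
  intro fuel
  induction fuel with
  | zero =>
    intro V Q n hnd hQ hf
    have hQnil : Q = [] := by
      cases Q with
      | nil => rfl
      | cons a t => exfalso; simp only [List.length_cons] at hf; omega
    subst hQnil
    rw [pvFloodA_nil]
    exact pvFloodOut_self hnd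
  | succ fuel ih =>
    intro V Q n hnd hQ hf
    cases Q with
    | nil => rw [pvFloodA_nil]; exact pvFloodOut_self hnd
    | cons c rest =>
      have hcg : pvInGrid g c := hQ c (List.mem_cons_self ..)
      obtain ⟨hrow, hval⟩ := pvGet_resolve hcg
      have hred : pvFloodA g (fuel + 1) V (c :: rest) n =
          (if pvVal g c = 9 ∨ PySem.Set.contains V c then
            pvFloodA g fuel V rest n
          else
            pvFloodA g fuel (PySem.Set.add V c) (pvNbrsA g c ++ rest) (n + 1)) := by
        simp only [pvFloodA, hrow, hval]
      rw [hred]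
      by_cases hskip : pvVal g c = 9 ∨ PySem.Set.contains V c
      · rw [if_pos hskip]
        have out := ih V rest n hnd (fun x hx => hQ x (List.mem_cons_of_mem _ hx))
          (by simp only [List.length_cons] at hf; omega)
        refine ⟨out.nd, out.mono, ?_, ?_, out.closed, out.okNew, out.card⟩
        · intro c' hc'
          rcases out.src c' hc' with h | ⟨q, hq, hqo, hqr⟩
          · exact Or.inl h
          · exact Or.inr ⟨q, List.mem_cons_of_mem _ hq, hqo, hqr⟩
        · intro q hq hqo
          rcases List.mem_cons.mp hq with rfl | hq'
          · have hcv : PySem.Set.contains V q := by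
              rcases hskip with h9 | h
              · exact absurd h9 hqo.2
              · exact h
            exact out.mono q ((PySem.Set.contains_iff V q).mp hcv)
          · exact out.done q hq' hqo
      · rw [if_neg hskip]
        push_neg at hskip
        obtain ⟨h9, hcV'⟩ := hskip
        have hcV : c ∉ V := by
          intro hmem
          exact hcV' ((PySem.Set.contains_iff V c).mpr hmem)
        have hok : pvOk g c := ⟨hcg, h9⟩
        have hnbr : pvNbrsA g c = pvNbrsB g c := pvNbrsA_eq_nbrsB hPre hcg
        have hmemadd : ∀ x, x ∈ PySem.Set.add V c ↔ x ∈ V ∨ x = c := by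
          intro x; exact PySem.Set.mem_add ..
        have hcount : (pvCells g).countP (fun x => !(PySem.Set.contains (PySem.Set.add V c) x)) + 1
            ≤ (pvCells g).countP (fun x => !(PySem.Set.contains V x)) := by
          apply pvCountP_succ_le
          · intro a _ hqa
            simp only [Bool.not_eq_true', Bool.eq_false_iff, ne_eq] at hqa ⊢
            intro hVa
            exact hqa ((PySem.Set.contains_iff ..).mpr ((hmemadd a).mpr
              (Or.inl ((PySem.Set.contains_iff ..).mp hVa))))
          · exact pvMem_cells.mpr hcg
          · simp only [Bool.not_eq_true', Bool.eq_false_iff]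
            intro hco
            exact hcV ((PySem.Set.contains_iff ..).mp hco)
          · simp only [Bool.not_eq_true', Bool.eq_false_iff, ne_eq, not_not]
            exact (PySem.Set.contains_iff ..).mpr ((hmemadd c).mpr (Or.inr rfl))
        have out := ih (PySem.Set.add V c) (pvNbrsA g c ++ rest) (n + 1)
          (PySem.Set.nodup_add V c hnd)
          (by
            intro x hx
            rcases List.mem_append.mp hx with hx' | hx'
            · rw [hnbr] at hx'
              exact (pvMem_nbrsB.mp hx').1
            · exact hQ x (List.mem_cons_of_mem _ hx'))
          (by
            have hnb4 := pvNbrsA_len_le (g := g) c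
            simp only [List.length_append, List.length_cons] at hf ⊢
            omega)
        have hVlen : (PySem.Set.add V c).length = V.length + 1 := by
          rw [PySem.Set.add_of_not_mem hcV, List.length_append, List.length_cons,
            List.length_nil]
        refine ⟨out.nd, ?_, ?_, ?_, ?_, ?_, ?_⟩
        · intro x hx
          exact out.mono x ((hmemadd x).mpr (Or.inl hx))
        · intro c' hc'
          rcases out.src c' hc' with h | ⟨q, hq, hqo, hqr⟩
          · rcases (hmemadd c').mp h with h' | rfl
            · exact Or.inl h'
            · exact Or.inr ⟨c', List.mem_cons_self .., hok, Relation.ReflTransGen.refl⟩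
          · rcases List.mem_append.mp hq with hq' | hq'
            · refine Or.inr ⟨c, List.mem_cons_self .., hok, ?_⟩
              refine Relation.ReflTransGen.head ⟨hok, hqo, ?_⟩ hqr
              rw [← hnbr]; exact hq'
            · exact Or.inr ⟨q, List.mem_cons_of_mem _ hq', hqo, hqr⟩
        · intro q hq hqo
          rcases List.mem_cons.mp hq with rfl | hq'
          · exact out.mono q ((hmemadd q).mpr (Or.inr rfl))
          · exact out.done q (List.mem_append_right _ hq') hqo
        · intro c' hc' hc'V d hd
          by_cases hcc : c' = c
          · subst hcc
            apply out.done d (List.mem_append_left _ (by rw [hnbr]; exact hd.2.2)) hd.2.1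
          · exact out.closed c' hc' (fun hmem => (by
              rcases (hmemadd c').mp hmem with h' | h'
              · exact hc'V h'
              · exact hcc h')) d hd
        · intro c' hc' hc'V
          by_cases hcc : c' = c
          · subst hcc; exact hok
          · exact out.okNew c' hc' (fun hmem => (by
              rcases (hmemadd c').mp hmem with h' | h'
              · exact hc'V h'
              · exact hcc h'))
        · obtain ⟨hlen, hsz⟩ := out.card
          rw [hVlen] at hlen hsz
          constructor
          · omega
          · rw [hsz]; push_cast; omega


theorem pvFloodA_run {g : List (List Int)} (hPre : Pre_basins g) {V : PySem.Set (Int × Int)}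
    {s : Int × Int} {fuel : Nat} {n : Int}
    (hnd : V.Nodup) (hVok : ∀ c ∈ V, pvOk g c)
    (hVcl : ∀ c ∈ V, ∀ d, pvStep g c d → d ∈ V)
    (hs : pvOk g s) (hsV : s ∉ V)
    (hf : 4 * ((pvCells g).countP (fun x => !(PySem.Set.contains V x))) + 1 ≤ fuel) :
    (pvFloodA g fuel V [s] n).1.Nodup ∧
    (∀ x, x ∈ (pvFloodA g fuel V [s] n).1 ↔ x ∈ V ∨ pvReach g s x) ∧
    (∀ c ∈ (pvFloodA g fuel V [s] n).1, pvOk g c) ∧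
    (∀ c ∈ (pvFloodA g fuel V [s] n).1, ∀ d, pvStep g c d → d ∈ (pvFloodA g fuel V [s] n).1) ∧
    (pvFloodA g fuel V [s] n).2 = n +
      ((((pvFloodA g fuel V [s] n).1.filter
          (fun x => !(PySem.Set.contains V x))).length : Nat) : Int) ∧
    (∀ x, x ∈ (pvFloodA g fuel V [s] n).1.filter (fun x => !(PySem.Set.contains V x)) ↔
        pvReach g s x) := by
  have out := pvFloodA_spec hPre fuel V [s] n hnd
    (by intro c hc; rw [List.mem_singleton] at hc; subst hc; exact hs.1)
    (by simpa using hf)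
  set r := pvFloodA g fuel V [s] n with hr
  have hreach_mem : ∀ x, pvReach g s x → x ∈ r.1 := by
    intro x hx
    induction hx with
    | refl => exact out.done s (List.mem_singleton_self s) hs
    | tail _ hstep ih =>
      rename_i b c' _
      by_cases hbV : b ∈ V
      · exact out.mono _ (hVcl b hbV _ hstep)
      · exact out.closed b ih hbV _ hstep
  have hreach_notV : ∀ x, pvReach g s x → x ∉ V := by
    intro x hx hxV
    exact hsV (pvReach_closed hVcl hxV (pvReach_symm hx))
  have hmem : ∀ x, x ∈ r.1 ↔ x ∈ V ∨ pvReach g s x := by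
    intro x
    constructor
    · intro hx
      rcases out.src x hx with h | ⟨q, hq, _, hqr⟩
      · exact Or.inl h
      · rw [List.mem_singleton] at hq; subst hq; exact Or.inr hqr
    · rintro (h | h)
      · exact out.mono x h
      · exact hreach_mem x h
  have hokAll : ∀ c ∈ r.1, pvOk g c := by
    intro c hc
    by_cases hcV : c ∈ V
    · exact hVok c hcV
    · exact out.okNew c hc hcV
  have hclAll : ∀ c ∈ r.1, ∀ d, pvStep g c d → d ∈ r.1 := by
    intro c hc d hd
    by_cases hcV : c ∈ V
    · exact out.mono _ (hVcl c hcV _ hd)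
    · exact out.closed c hc hcV _ hd
  have hfiltmem : ∀ x, x ∈ r.1.filter (fun x => !(PySem.Set.contains V x)) ↔ pvReach g s x := by
    intro x
    rw [List.mem_filter]
    constructor
    · rintro ⟨hx, hnx⟩
      rcases (hmem x).mp hx with h | h
      · exfalso
        simp only [Bool.not_eq_true', Bool.eq_false_iff, ne_eq] at hnx
        exact hnx ((PySem.Set.contains_iff ..).mpr h)
      · exact h
    · intro hx
      refine ⟨hreach_mem x hx, ?_⟩
      simp only [Bool.not_eq_true', Bool.eq_false_iff, ne_eq]
      intro hc
      exact hreach_notV x hx ((PySem.Set.contains_iff ..).mp hc)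
  refine ⟨out.nd, hmem, hokAll, hclAll, ?_, hfiltmem⟩
  have hsplit : (r.1.filter (fun x => PySem.Set.contains V x)).length +
      (r.1.filter (fun x => !(PySem.Set.contains V x))).length = r.1.length :=
    Eq.symm (List.length_eq_length_filter_add ..)
  have hVpart : (r.1.filter (fun x => PySem.Set.contains V x)).length = V.length := by
    apply pvLength_eq_of_mem_iff (out.nd.filter _) hnd
    intro x
    rw [List.mem_filter]
    constructor
    · rintro ⟨_, hx⟩
      exact (PySem.Set.contains_iff ..).mp hx
    · intro hx
      exact ⟨out.mono x hx, (PySem.Set.contains_iff ..).mpr hx⟩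
  obtain ⟨hle, hsz⟩ := out.card
  rw [hsz]
  congr 1
  omega


-- ---- characterization of B's labelling flood ----
structure PvFloodBOut (g : List (List Int)) (L0 : PySem.Dict (Int × Int) Int)
    (Q : List (Int × Int)) (lid : Int) (n : Int)
    (r : PySem.Dict (Int × Int) Int × Int) : Prop where
  nd : r.1.keys.Nodup
  mono : ∀ c v, L0.get? c = some v → r.1.get? c = some v
  news : ∀ c, L0.contains c = false → r.1.contains c = true → r.1.get? c = some lid
  src : ∀ c, r.1.contains c = true →
    L0.contains c = true ∨ ∃ q ∈ Q, pvOk g q ∧ pvReach g q c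
  done : ∀ q ∈ Q, pvOk g q → r.1.contains q = true
  closed : ∀ c, r.1.contains c = true → L0.contains c = false →
    ∀ d, pvStep g c d → r.1.contains d = true
  okNew : ∀ c, r.1.contains c = true → L0.contains c = false → pvOk g c
  card : L0.size ≤ r.1.size ∧ r.2 = n + ((r.1.size - L0.size : Nat) : Int)

theorem pvFloodB_nil {g : List (List Int)} {lid : Int} {fuel : Nat}
    {L : PySem.Dict (Int × Int) Int} {n : Int} :
    pvFloodB g lid fuel L [] n = (L, n) := by cases fuel <;> rfl

theorem pvFloodBOut_self {g : List (List Int)} {L : PySem.Dict (Int × Int) Int}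
    {lid n : Int} (hnd : L.keys.Nodup) : PvFloodBOut g L [] lid n (L, n) := by
  refine ⟨hnd, fun c v h => h, ?_, fun c hc => Or.inl hc, by simp, ?_, ?_, le_refl _, by simp⟩
  · intro c h1 h2; rw [h1] at h2; simp at h2
  · intro c h1 h2; rw [h1] at h2; simp at h2
  · intro c h1 h2; rw [h1] at h2; simp at h2

theorem pvNbrsB_len_le {g : List (List Int)} (c : Int × Int) : (pvNbrsB g c).length ≤ 4 := by
  have := List.length_filter_le (fun d => (pvGetCellB g d.1 d.2).isSome)
    [(c.1 - 1, c.2), (c.1 + 1, c.2), (c.1, c.2 - 1), (c.1, c.2 + 1)]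
  simpa [pvNbrsB] using this

theorem pvKeysLen_eq_size {L : PySem.Dict (Int × Int) Int} : L.keys.length = L.size := by
  simp [PySem.Dict.keys, PySem.Dict.size]

theorem pvFloodB_spec {g : List (List Int)} {lid : Int} :
    ∀ (fuel : Nat) (L : PySem.Dict (Int × Int) Int) (Q : List (Int × Int)) (n : Int),
      L.keys.Nodup → (∀ c ∈ Q, pvInGrid g c) →
      4 * ((pvCells g).countP (fun x => !(L.contains x))) + Q.length ≤ fuel →
      PvFloodBOut g L Q lid n (pvFloodB g lid fuel L Q n) := by
  intro fuel
  induction fuel with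
  | zero =>
    intro L Q n hnd hQ hf
    have hQnil : Q = [] := by
      cases Q with
      | nil => rfl
      | cons a t => exfalso; simp only [List.length_cons] at hf; omega
    subst hQnil
    rw [pvFloodB_nil]
    exact pvFloodBOut_self hnd
  | succ fuel ih =>
    intro L Q n hnd hQ hf
    cases Q with
    | nil => rw [pvFloodB_nil]; exact pvFloodBOut_self hnd
    | cons c rest =>
      have hcg : pvInGrid g c := hQ c (List.mem_cons_self ..)
      have hcell : pvGetCellB g c.1 c.2 = some (pvVal g c) := by
        rw [pvGetCellB_eq_some_iff]
        exact ⟨by cases c; exact hcg, by cases c; rfl⟩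
      have hred : pvFloodB g lid (fuel + 1) L (c :: rest) n =
          (if pvVal g c = 9 ∨ L.contains c then
            pvFloodB g lid fuel L rest n
          else
            pvFloodB g lid fuel (L.insert c lid) (pvNbrsB g c ++ rest) (n + 1)) := by
        simp only [pvFloodB, hcell]
      rw [hred]
      by_cases hskip : pvVal g c = 9 ∨ L.contains c
      · rw [if_pos hskip]
        have out := ih L rest n hnd (fun x hx => hQ x (List.mem_cons_of_mem _ hx))
          (by simp only [List.length_cons] at hf; omega)
        refine ⟨out.nd, out.mono, out.news, ?_, ?_, out.closed, out.okNew, out.card⟩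
        · intro c' hc'
          rcases out.src c' hc' with h | ⟨q, hq, hqo, hqr⟩
          · exact Or.inl h
          · exact Or.inr ⟨q, List.mem_cons_of_mem _ hq, hqo, hqr⟩
        · intro q hq hqo
          rcases List.mem_cons.mp hq with rfl | hq'
          · have hcv : L.contains q = true := by
              rcases hskip with h9 | h
              · exact absurd h9 hqo.2
              · exact h
            rw [PySem.Dict.contains_eq_isSome_get?] at hcv
            obtain ⟨v, hv⟩ := Option.isSome_iff_exists.mp hcv
            rw [PySem.Dict.contains_eq_isSome_get?, out.mono q v hv]; rfl
          · exact out.done q hq' hqo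
      · rw [if_neg hskip]
        push_neg at hskip
        obtain ⟨h9, hcL'⟩ := hskip
        have hcL : L.contains c = false := by
          cases h : L.contains c
          · rfl
          · exact absurd h hcL'
        have hok : pvOk g c := ⟨hcg, h9⟩
        have hcget : L.get? c = none := (PySem.Dict.get?_eq_none_iff_contains ..).mpr hcL
        have hcont' : ∀ x, (L.insert c lid).contains x = (x == c || L.contains x) :=
          fun x => PySem.Dict.contains_insert ..
        have hcount : (pvCells g).countP (fun x => !((L.insert c lid).contains x)) + 1
            ≤ (pvCells g).countP (fun x => !(L.contains x)) := by
          apply pvCountP_succ_le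
          · intro a _ hqa
            rw [hcont' a] at hqa
            simp only [Bool.not_eq_true', Bool.or_eq_false_iff] at hqa
            simp [hqa.2]
          · exact pvMem_cells.mpr hcg
          · simp [hcL]
          · simp [hcont' c]
        have out := ih (L.insert c lid) (pvNbrsB g c ++ rest) (n + 1)
          (PySem.Dict.nodup_keys_insert _ _ _ hnd)
          (by
            intro x hx
            rcases List.mem_append.mp hx with hx' | hx'
            · exact (pvMem_nbrsB.mp hx').1
            · exact hQ x (List.mem_cons_of_mem _ hx'))
          (by
            have hnb4 := pvNbrsB_len_le (g := g) c
            simp only [List.length_append, List.length_cons] at hf ⊢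
            omega)
        have hszins : (L.insert c lid).size = L.size + 1 := by
          rw [PySem.Dict.size_insert, if_neg (by simp [hcL])]
        refine ⟨out.nd, ?_, ?_, ?_, ?_, ?_, ?_, ?_⟩
        · intro c' v hv
          have hne : c' ≠ c := fun h => by rw [h, hcget] at hv; simp at hv
          exact out.mono c' v (by rw [PySem.Dict.get?_insert, if_neg hne]; exact hv)
        · intro c' hc'F hc'T
          by_cases hcc : c' = c
          · subst hcc
            exact out.mono c' lid (by rw [PySem.Dict.get?_insert, if_pos rfl])
          · exact out.news c' (by rw [hcont' c']; simp [hcc, hc'F]) hc'T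
        · intro c' hc'
          rcases out.src c' hc' with h | ⟨q, hq, hqo, hqr⟩
          · rw [hcont' c'] at h
            rcases Bool.or_eq_true_iff.mp h with h' | h'
            · have : c' = c := by simpa using h'
              subst this
              exact Or.inr ⟨c', List.mem_cons_self .., hok, Relation.ReflTransGen.refl⟩
            · exact Or.inl h'
          · rcases List.mem_append.mp hq with hq' | hq'
            · exact Or.inr ⟨c, List.mem_cons_self .., hok,
                Relation.ReflTransGen.head ⟨hok, hqo, hq'⟩ hqr⟩
            · exact Or.inr ⟨q, List.mem_cons_of_mem _ hq', hqo, hqr⟩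
        · intro q hq hqo
          rcases List.mem_cons.mp hq with rfl | hq'
          · have hcv : (L.insert q lid).contains q = true := by simp [hcont' q]
            rw [PySem.Dict.contains_eq_isSome_get?] at hcv
            obtain ⟨v, hv⟩ := Option.isSome_iff_exists.mp hcv
            rw [PySem.Dict.contains_eq_isSome_get?, out.mono q v hv]; rfl
          · exact out.done q (List.mem_append_right _ hq') hqo
        · intro c' hc' hc'L d hd
          by_cases hcc : c' = c
          · subst hcc
            exact out.done d (List.mem_append_left _ hd.2.2) hd.2.1
          · exact out.closed c' hc' (by rw [hcont' c']; simp [hcc, hc'L]) d hd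
        · intro c' hc' hc'L
          by_cases hcc : c' = c
          · subst hcc; exact hok
          · exact out.okNew c' hc' (by rw [hcont' c']; simp [hcc, hc'L])
        · obtain ⟨hle, hsz⟩ := out.card
          rw [hszins] at hle hsz
          constructor
          · omega
          · rw [hsz]; omega


theorem pvFloodB_run {g : List (List Int)} {L : PySem.Dict (Int × Int) Int}
    {s : Int × Int} {fuel : Nat} {lid n : Int}
    (hnd : L.keys.Nodup) (hLok : ∀ x, L.contains x = true → pvOk g x)
    (hLcl : ∀ x, L.contains x = true → ∀ d, pvStep g x d → L.contains d = true)
    (hs : pvOk g s) (hsL : L.contains s = false)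
    (hf : 4 * ((pvCells g).countP (fun x => !(L.contains x))) + 1 ≤ fuel) :
    (pvFloodB g lid fuel L [s] n).1.keys.Nodup ∧
    (∀ x, (pvFloodB g lid fuel L [s] n).1.contains x = true ↔
        L.contains x = true ∨ pvReach g s x) ∧
    (∀ x v, L.get? x = some v → (pvFloodB g lid fuel L [s] n).1.get? x = some v) ∧
    (∀ x, pvReach g s x → (pvFloodB g lid fuel L [s] n).1.get? x = some lid) ∧
    (∀ x, ¬ pvReach g s x → (pvFloodB g lid fuel L [s] n).1.get? x = L.get? x) ∧
    (∀ x, (pvFloodB g lid fuel L [s] n).1.contains x = true → pvOk g x) ∧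
    ((pvFloodB g lid fuel L [s] n).2 = n +
      ((((pvFloodB g lid fuel L [s] n).1.keys.filter
          (fun x => !(L.contains x))).length : Nat) : Int)) ∧
    (∀ x, x ∈ (pvFloodB g lid fuel L [s] n).1.keys.filter (fun x => !(L.contains x)) ↔
        pvReach g s x) ∧
    ((pvFloodB g lid fuel L [s] n).1.keys.filter (fun x => !(L.contains x))).Nodup := by
  have out := pvFloodB_spec (g := g) (lid := lid) fuel L [s] n hnd
    (by intro c hc; rw [List.mem_singleton] at hc; subst hc; exact hs.1)
    (by simpa using hf)
  set r := pvFloodB g lid fuel L [s] n with hr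
  have hLreach : ∀ x y, L.contains x = true → pvReach g x y → L.contains y = true := by
    intro x y hx hxy
    induction hxy with
    | refl => exact hx
    | tail _ hstep ih => exact hLcl _ ih _ hstep
  have hreach_mem : ∀ x, pvReach g s x → r.1.contains x = true := by
    intro x hx
    induction hx with
    | refl => exact out.done s (List.mem_singleton_self s) hs
    | tail _ hstep ih =>
      rename_i b c' _
      cases hbL : L.contains b
      · exact out.closed b ih hbL _ hstep
      · have := hLcl b hbL _ hstep
        rw [PySem.Dict.contains_eq_isSome_get?] at this
        obtain ⟨v, hv⟩ := Option.isSome_iff_exists.mp this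
        rw [PySem.Dict.contains_eq_isSome_get?, out.mono _ v hv]; rfl
  have hreach_notL : ∀ x, pvReach g s x → L.contains x = false := by
    intro x hx
    cases hxL : L.contains x
    · rfl
    · exact absurd (hLreach x s hxL (pvReach_symm hx)) (by simp [hsL])
  have hmem : ∀ x, r.1.contains x = true ↔ L.contains x = true ∨ pvReach g s x := by
    intro x
    constructor
    · intro hx
      rcases out.src x hx with h | ⟨q, hq, _, hqr⟩
      · exact Or.inl h
      · rw [List.mem_singleton] at hq; subst hq; exact Or.inr hqr
    · rintro (h | h)
      · rw [PySem.Dict.contains_eq_isSome_get?] at h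
        obtain ⟨v, hv⟩ := Option.isSome_iff_exists.mp h
        rw [PySem.Dict.contains_eq_isSome_get?, out.mono _ v hv]; rfl
      · exact hreach_mem x h
  have hmono : ∀ x v, L.get? x = some v → r.1.get? x = some v := out.mono
  have hnew : ∀ x, pvReach g s x → r.1.get? x = some lid := by
    intro x hx
    exact out.news x (hreach_notL x hx) (hreach_mem x hx)
  have hold : ∀ x, ¬ pvReach g s x → r.1.get? x = L.get? x := by
    intro x hx
    cases hg : L.get? x with
    | some v => exact hmono x v hg
    | none =>
      have hxL : L.contains x = false := (PySem.Dict.get?_eq_none_iff_contains ..).mp hg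
      rw [PySem.Dict.get?_eq_none_iff_contains]
      cases hrc : r.1.contains x
      · rfl
      · rcases (hmem x).mp hrc with h | h
        · rw [h] at hxL; exact absurd hxL (by simp)
        · exact absurd h hx
  have hokAll : ∀ x, r.1.contains x = true → pvOk g x := by
    intro x hx
    rcases (hmem x).mp hx with h | h
    · exact hLok x h
    · exact pvReach_ok h hs
  have hfiltmem : ∀ x, x ∈ r.1.keys.filter (fun x => !(L.contains x)) ↔ pvReach g s x := by
    intro x
    rw [List.mem_filter]
    constructor
    · rintro ⟨hx, hnx⟩
      have hxc : r.1.contains x = true := (PySem.Dict.contains_iff_mem_keys ..).mpr hx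
      rcases (hmem x).mp hxc with h | h
      · rw [h] at hnx; exact absurd hnx (by simp)
      · exact h
    · intro hx
      refine ⟨(PySem.Dict.contains_iff_mem_keys ..).mp (hreach_mem x hx), ?_⟩
      rw [hreach_notL x hx]; rfl
  refine ⟨out.nd, hmem, hmono, hnew, hold, hokAll, ?_, hfiltmem,
    out.nd.filter _⟩
  have hsplit : (r.1.keys.filter (fun x => L.contains x)).length +
      (r.1.keys.filter (fun x => !(L.contains x))).length = r.1.keys.length :=
    Eq.symm (List.length_eq_length_filter_add ..)
  have hLpart : (r.1.keys.filter (fun x => L.contains x)).length = L.keys.length := by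
    apply pvLength_eq_of_mem_iff (out.nd.filter _) hnd
    intro x
    rw [List.mem_filter]
    constructor
    · rintro ⟨_, hx⟩
      exact (PySem.Dict.contains_iff_mem_keys ..).mp hx
    · intro hx
      have hxc : L.contains x = true := (PySem.Dict.contains_iff_mem_keys ..).mpr hx
      refine ⟨?_, hxc⟩
      exact (PySem.Dict.contains_iff_mem_keys ..).mp ((hmem x).mpr (Or.inl hxc))
  obtain ⟨hle, hsz⟩ := out.card
  rw [hsz]
  congr 1
  have e1 : r.1.keys.length = r.1.size := pvKeysLen_eq_size
  have e2 : L.keys.length = L.size := pvKeysLen_eq_size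
  omega


-- ---- the two low-point tests agree on rectangular grids ----
theorem pvCountP_eq_iff {α : Type} {l : List α} {p q : α → Bool}
    (h : ∀ a ∈ l, p a = true → q a = true) :
    l.countP p = l.countP q ↔ ∀ a ∈ l, q a = true → p a = true := by
  induction l with
  | nil => simp
  | cons a t ih =>
    have ht : t.countP p ≤ t.countP q :=
      List.countP_mono_left (fun x hx => h x (List.mem_cons_of_mem _ hx))
    have iht := ih (fun x hx => h x (List.mem_cons_of_mem _ hx))
    by_cases hpa : p a = true
    · have hqa : q a = true := h a (List.mem_cons_self ..) hpa
      rw [List.countP_cons_of_pos (p := p) (by exact hpa),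
        List.countP_cons_of_pos (p := q) (by exact hqa)]
      constructor
      · intro heq x hx hqx
        rcases List.mem_cons.mp hx with rfl | hx'
        · exact hpa
        · exact iht.mp (by omega) x hx' hqx
      · intro hall
        have := iht.mpr (fun x hx hqx => hall x (List.mem_cons_of_mem _ hx) hqx)
        omega
    · have hpa' : p a = false := by simpa using hpa
      by_cases hqa : q a = true
      · rw [List.countP_cons_of_neg (p := p) (by simp [hpa']),
          List.countP_cons_of_pos (p := q) (by exact hqa)]
        constructor
        · intro heq
          exact absurd heq (by omega)
        · intro hall
          exact absurd (hall a (List.mem_cons_self ..) hqa) (by simp [hpa'])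
      · have hqa' : q a = false := by simpa using hqa
        rw [List.countP_cons_of_neg (p := p) (by simp [hpa']),
          List.countP_cons_of_neg (p := q) (by simp [hqa']), iht]
        constructor
        · intro hall x hx hqx
          rcases List.mem_cons.mp hx with rfl | hx'
          · exact absurd hqx (by simp [hqa'])
          · exact hall x hx' hqx
        · intro hall x hx hqx
          exact hall x (List.mem_cons_of_mem _ hx) hqx

theorem pvLowFoldA {g : List (List Int)} {i j : Int} :
    ∀ (ds : List (Int × Int)) (nc lt : Int),
      ds.foldl (pvLowStepA g i j) (nc, lt) =
        (nc - (ds.countP (fun d => decide (i + d.1 < 0 ∨ i + d.1 = (g.length : Int) ∨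
            j + d.2 < 0 ∨ j + d.2 = ((PySem.List.pyGetD g i []).length : Int))) : Int),
         lt + (ds.countP (fun d =>
            !(decide (i + d.1 < 0 ∨ i + d.1 = (g.length : Int) ∨
              j + d.2 < 0 ∨ j + d.2 = ((PySem.List.pyGetD g i []).length : Int))) &&
            decide (PySem.List.pyGetD (PySem.List.pyGetD g (i + d.1) []) (j + d.2) 0 >
              PySem.List.pyGetD (PySem.List.pyGetD g i []) j 0)) : Int)) := by
  intro ds
  induction ds with
  | nil => intro nc lt; simp
  | cons d t ih =>
    intro nc lt
    by_cases hout : i + d.1 < 0 ∨ i + d.1 = (g.length : Int) ∨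
        j + d.2 < 0 ∨ j + d.2 = ((PySem.List.pyGetD g i []).length : Int)
    · have hstep : pvLowStepA g i j (nc, lt) d = (nc - 1, lt) := by
        simp only [pvLowStepA, if_pos hout]
      simp only [List.foldl_cons, hstep, ih, List.countP_cons]
      simp only [hout, decide_true, Bool.not_true, Bool.false_and, if_true]
      rw [Prod.mk.injEq]
      refine ⟨by push_cast; ring, by simp⟩
    · by_cases hgt : PySem.List.pyGetD (PySem.List.pyGetD g (i + d.1) []) (j + d.2) 0 >
          PySem.List.pyGetD (PySem.List.pyGetD g i []) j 0
      · have hstep : pvLowStepA g i j (nc, lt) d = (nc, lt + 1) := by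
          simp only [pvLowStepA, if_neg hout, if_pos hgt]
        simp only [List.foldl_cons, hstep, ih, List.countP_cons]
        simp only [hout, hgt, decide_true, decide_false, Bool.not_false, Bool.true_and, if_true]
        rw [Prod.mk.injEq]
        refine ⟨by simp, by push_cast; ring⟩
      · have hstep : pvLowStepA g i j (nc, lt) d = (nc, lt + 0) := by
          simp only [pvLowStepA, if_neg hout, if_neg hgt]
        simp only [List.foldl_cons, hstep, ih, List.countP_cons]
        simp only [hout, hgt, decide_false, Bool.not_false, Bool.and_false, if_false]
        simp

theorem pvOut_iff {g : List (List Int)} {a b w : Int}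
    (ha : a ≤ (g.length : Int))
    (hw : 0 ≤ a → a < (g.length : Int) → ((PySem.List.pyGetD g a []).length : Int) = w)
    (hb : b ≤ w) :
    (a < 0 ∨ a = (g.length : Int) ∨ b < 0 ∨ b = w) ↔ pvGetCellB g a b = none := by
  unfold pvGetCellB
  split_ifs with h
  · simp only [reduceCtorEq, iff_false]
    obtain ⟨h1, h2, h3, h4⟩ := h
    have := hw h1 h2
    omega
  · simp only [iff_true]
    by_cases hr : 0 ≤ a ∧ a < (g.length : Int)
    · have := hw hr.1 hr.2
      omega
    · omega

theorem pvIsLow_eq {g : List (List Int)} (hPre : Pre_basins g) {i j : Int}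
    (hc : pvInGrid g (i, j)) : pvIsLowA g i j = pvIsLowB g i j := by
  obtain ⟨h1, h2, h3, h4⟩ := hc
  have h1' : 0 ≤ i := h1
  have h2' : i < (g.length : Int) := h2
  have h3' : 0 ≤ j := h3
  have h4' : j < ((PySem.List.pyGetD g i []).length : Int) := h4
  have hw : ∀ a : Int, 0 ≤ a → a < (g.length : Int) →
      ((PySem.List.pyGetD g a []).length : Int) = ((PySem.List.pyGetD g i []).length : Int) := by
    intro a ha0 ha1
    exact_mod_cast pvPre_width hPre ha0 ha1 h1' h2'
  rw [Bool.eq_iff_iff]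
  unfold pvIsLowA pvIsLowB
  rw [pvLowFoldA pvDirs8 8 0]
  simp only [beq_iff_eq, List.all_eq_true]
  set outP : (Int × Int) → Bool := fun d => decide (i + d.1 < 0 ∨ i + d.1 = (g.length : Int) ∨
      j + d.2 < 0 ∨ j + d.2 = ((PySem.List.pyGetD g i []).length : Int)) with houtP
  set gtP : (Int × Int) → Bool := fun d =>
      decide (PySem.List.pyGetD (PySem.List.pyGetD g (i + d.1) []) (j + d.2) 0 >
        PySem.List.pyGetD (PySem.List.pyGetD g i []) j 0) with hgtP
  have hlen : pvDirs8.countP outP + pvDirs8.countP (fun d => !outP d) = 8 := by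
    have := List.length_eq_countP_add_countP outP (l := pvDirs8)
    simpa [pvDirs8] using this.symm
  have hmono : ∀ d ∈ pvDirs8, (!outP d && gtP d) = true → (!outP d) = true := by
    intro d _ hd
    exact (Bool.and_eq_true ..).mp hd |>.1
  have hcnt : (0 + (pvDirs8.countP (fun d => !outP d && gtP d) : Int) =
      8 - (pvDirs8.countP outP : Int)) ↔
      pvDirs8.countP (fun d => !outP d && gtP d) = pvDirs8.countP (fun d => !outP d) := by
    omega
  rw [hcnt, pvCountP_eq_iff hmono]
  have hout_iff : ∀ d ∈ pvDirs8, (outP d = true ↔ pvGetCellB g (i + d.1) (j + d.2) = none) := by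
    intro d hd
    have hdb : -1 ≤ d.1 ∧ d.1 ≤ 1 ∧ -1 ≤ d.2 ∧ d.2 ≤ 1 := by
      simp only [pvDirs8, List.mem_cons, List.not_mem_nil, or_false] at hd
      rcases hd with h|h|h|h|h|h|h|h <;> subst h <;> norm_num
    rw [houtP]
    simp only [decide_eq_true_eq]
    exact pvOut_iff (by omega) (fun ha0 ha1 => hw _ ha0 ha1) (by omega)
  have hval_eq : ∀ (x : Int × Int) (wv : Int), pvGetCellB g (i + x.1) (j + x.2) = some wv →
      wv = PySem.List.pyGetD (PySem.List.pyGetD g (i + x.1) []) (j + x.2) 0 := by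
    intro x wv hcell
    unfold pvGetCellB at hcell
    split_ifs at hcell with hx
    exact (Option.some.inj hcell).symm
  constructor
  · intro hall x hx
    cases hcell : pvGetCellB g (i + x.1) (j + x.2) with
    | none => rfl
    | some wv =>
      have houtF : (!outP x) = true := by
        rw [Bool.not_eq_true']
        cases ho : outP x
        · rfl
        · exact absurd ((hout_iff x hx).mp ho) (by simp [hcell])
      have hgt := (Bool.and_eq_true ..).mp (hall x hx houtF) |>.2
      rw [hgtP] at hgt
      simp only [decide_eq_true_eq] at hgt
      rw [hval_eq x wv hcell]
      simpa using hgt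
  · intro hall x hx hno
    cases hcell : pvGetCellB g (i + x.1) (j + x.2) with
    | none =>
      exfalso
      have := (hout_iff x hx).mpr hcell
      rw [this] at hno
      simp at hno
    | some wv =>
      have hb := hall x hx
      rw [hcell] at hb
      rw [Bool.and_eq_true]
      refine ⟨hno, ?_⟩
      rw [hgtP]
      simp only [decide_eq_true_eq]
      rw [← hval_eq x wv hcell]
      simpa using hb


-- ---- pass 1 of B: the label table and the size list it builds ----
def pvP1F (g : List (List Int)) :
    (PySem.Dict (Int × Int) Int × List Int) → (Int × Int) →
    (PySem.Dict (Int × Int) Int × List Int) := fun st c =>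
  if pvVal g c = 9 ∨ st.1.contains c then st
  else
    let r := pvFloodB g (st.2.length : Int) (4 * (pvCells g).length + 1) st.1 [c] 0
    (r.1, st.2 ++ [r.2])

structure PvInv1 (g : List (List Int)) (L : PySem.Dict (Int × Int) Int)
    (sizes : List Int) : Prop where
  nd : L.keys.Nodup
  ok : ∀ c v, L.get? c = some v → pvOk g c
  lo : ∀ c v, L.get? c = some v → 0 ≤ v
  hi : ∀ c v, L.get? c = some v → v < (sizes.length : Int)
  const : ∀ c v, L.get? c = some v → ∀ d, pvReach g c d → L.get? d = some v
  inj : ∀ c d v, L.get? c = some v → L.get? d = some v → pvReach g c d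
  size : ∀ c v, L.get? c = some v → ∃ Lst : List (Int × Int), Lst.Nodup ∧
    (∀ x, x ∈ Lst ↔ pvReach g c x) ∧ PySem.List.pyGet? sizes v = some (Lst.length : Int)

theorem pvInv1_okAll {g : List (List Int)} {L : PySem.Dict (Int × Int) Int} {sizes : List Int}
    (hinv : PvInv1 g L sizes) : ∀ x, L.contains x = true → pvOk g x := by
  intro x hx
  rw [PySem.Dict.contains_eq_isSome_get?] at hx
  obtain ⟨v, hv⟩ := Option.isSome_iff_exists.mp hx
  exact hinv.ok x v hv

theorem pvInv1_closed {g : List (List Int)} {L : PySem.Dict (Int × Int) Int} {sizes : List Int}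
    (hinv : PvInv1 g L sizes) :
    ∀ x, L.contains x = true → ∀ d, pvStep g x d → L.contains d = true := by
  intro x hx d hd
  rw [PySem.Dict.contains_eq_isSome_get?] at hx
  obtain ⟨v, hv⟩ := Option.isSome_iff_exists.mp hx
  have := hinv.const x v hv d (Relation.ReflTransGen.single hd)
  rw [PySem.Dict.contains_eq_isSome_get?, this]; rfl

theorem pvPass1 {g : List (List Int)} (hPre : Pre_basins g) :
    ∀ (l : List (Int × Int)) (L : PySem.Dict (Int × Int) Int) (sizes : List Int),
      (∀ c ∈ l, pvInGrid g c) → PvInv1 g L sizes →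
      PvInv1 g (l.foldl (pvP1F g) (L, sizes)).1 (l.foldl (pvP1F g) (L, sizes)).2 ∧
      (∀ c v, L.get? c = some v → (l.foldl (pvP1F g) (L, sizes)).1.get? c = some v) ∧
      (∀ c ∈ l, pvOk g c → (l.foldl (pvP1F g) (L, sizes)).1.contains c = true) := by
  intro l
  induction l with
  | nil =>
    intro L sizes _ hinv
    exact ⟨hinv, fun c v h => h, by simp⟩
  | cons c t ih =>
    intro L sizes hl hinv
    have hcg : pvInGrid g c := hl c (List.mem_cons_self ..)
    have hlt : ∀ x ∈ t, pvInGrid g x := fun x hx => hl x (List.mem_cons_of_mem _ hx)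
    rw [List.foldl_cons]
    by_cases hbr : pvVal g c = 9 ∨ L.contains c = true
    · have hF : pvP1F g (L, sizes) c = (L, sizes) := by
        unfold pvP1F
        exact if_pos hbr
      rw [hF]
      obtain ⟨hinv', hmono', hcomp'⟩ := ih L sizes hlt hinv
      refine ⟨hinv', hmono', ?_⟩
      intro x hx hxok
      rcases List.mem_cons.mp hx with rfl | hx'
      · have hcont : L.contains x = true := by
          rcases hbr with h9 | h
          · exact absurd h9 hxok.2
          · exact h
        rw [PySem.Dict.contains_eq_isSome_get?] at hcont
        obtain ⟨v, hv⟩ := Option.isSome_iff_exists.mp hcont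
        rw [PySem.Dict.contains_eq_isSome_get?, hmono' x v hv]; rfl
      · exact hcomp' x hx' hxok
    · push_neg at hbr
      obtain ⟨h9, hcont'⟩ := hbr
      have hcont : L.contains c = false := by
        cases h : L.contains c
        · rfl
        · exact absurd h hcont'
      have hok : pvOk g c := ⟨hcg, h9⟩
      have hF : pvP1F g (L, sizes) c =
          ((pvFloodB g (sizes.length : Int) (4 * (pvCells g).length + 1) L [c] 0).1,
            sizes ++ [(pvFloodB g (sizes.length : Int) (4 * (pvCells g).length + 1) L [c] 0).2]) := by
        unfold pvP1F
        rw [if_neg (by push_neg; exact ⟨h9, hcont'⟩)]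
      rw [hF]
      obtain ⟨rnd, rmem, rmono, rnew, rold, rokAll, rsz, rfilt, rfiltnd⟩ :=
        pvFloodB_run (lid := (sizes.length : Int)) (n := 0)
          (fuel := 4 * (pvCells g).length + 1)
          hinv.nd (pvInv1_okAll hinv) (pvInv1_closed hinv) hok hcont
          (by
            have := List.countP_le_length (l := pvCells g)
              (p := fun x => !(L.contains x))
            omega)
      set r := pvFloodB g (sizes.length : Int) (4 * (pvCells g).length + 1) L [c] 0 with hr
      set K := r.1.keys.filter (fun x => !(L.contains x)) with hK
      have hr2 : r.2 = (K.length : Int) := by rw [rsz]; simp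
      have hclass : ∀ x v, r.1.get? x = some v →
          (pvReach g c x ∧ v = (sizes.length : Int)) ∨ (¬ pvReach g c x ∧ L.get? x = some v) := by
        intro x v hx
        by_cases hrx : pvReach g c x
        · left
          refine ⟨hrx, ?_⟩
          have := rnew x hrx
          rw [this] at hx
          exact (Option.some.inj hx).symm
        · right
          refine ⟨hrx, ?_⟩
          rw [← rold x hrx]
          exact hx
      have hinv' : PvInv1 g r.1 (sizes ++ [r.2]) := by
        refine ⟨rnd, ?_, ?_, ?_, ?_, ?_, ?_⟩
        · intro x v hx
          rcases hclass x v hx with ⟨hrx, _⟩ | ⟨_, hold⟩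
          · exact pvReach_ok hrx hok
          · exact hinv.ok x v hold
        · intro x v hx
          rcases hclass x v hx with ⟨_, rfl⟩ | ⟨_, hold⟩
          · positivity
          · exact hinv.lo x v hold
        · intro x v hx
          rw [List.length_append, List.length_cons, List.length_nil]
          rcases hclass x v hx with ⟨_, rfl⟩ | ⟨_, hold⟩
          · push_cast; omega
          · have := hinv.hi x v hold
            push_cast
            omega
        · intro x v hx d hxd
          rcases hclass x v hx with ⟨hrx, rfl⟩ | ⟨hnrx, hold⟩
          · exact rnew d (hrx.trans hxd)
          · have hnd' : ¬ pvReach g c d := by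
              intro hcd
              exact hnrx (hcd.trans (pvReach_symm hxd))
            rw [rold d hnd']
            exact hinv.const x v hold d hxd
        · intro x y v hx hy
          rcases hclass x v hx with ⟨hrx, rfl⟩ | ⟨hnrx, holdx⟩
          · rcases hclass y _ hy with ⟨hry, _⟩ | ⟨hnry, holdy⟩
            · exact (pvReach_symm hrx).trans hry
            · have := hinv.hi y _ holdy
              omega
          · rcases hclass y v hy with ⟨hry, rfl⟩ | ⟨hnry, holdy⟩
            · have := hinv.hi x _ holdx
              omega
            · exact hinv.inj x y v holdx holdy
        · intro x v hx
          rcases hclass x v hx with ⟨hrx, rfl⟩ | ⟨hnrx, hold⟩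
          · refine ⟨K, rfiltnd, ?_, ?_⟩
            · intro y
              rw [rfilt y]
              constructor
              · intro h
                exact (pvReach_symm hrx).trans h
              · intro h
                exact hrx.trans h
            · rw [← hr2]
              exact PySem.List.pyGet?_append_length sizes [] r.2
          · obtain ⟨Lst, Lnd, Lmem, hpy⟩ := hinv.size x v hold
            refine ⟨Lst, Lnd, Lmem, ?_⟩
            have hv0 : 0 ≤ v := hinv.lo x v hold
            have hvlt : v < (sizes.length : Int) := hinv.hi x v hold
            rw [PySem.List.pyGet?_of_nonneg sizes hv0] at hpy
            rw [PySem.List.pyGet?_of_nonneg (sizes ++ [r.2]) hv0,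
              List.getElem?_append_left (by omega)]
            exact hpy
      obtain ⟨hinvF, hmonoF, hcompF⟩ := ih r.1 (sizes ++ [r.2]) hlt hinv'
      refine ⟨hinvF, ?_, ?_⟩
      · intro x v hx
        exact hmonoF x v (rmono x v hx)
      · intro x hx hxok
        rcases List.mem_cons.mp hx with rfl | hx'
        · have hxr : r.1.contains x = true := (rmem x).mpr (Or.inr Relation.ReflTransGen.refl)
          rw [PySem.Dict.contains_eq_isSome_get?] at hxr
          obtain ⟨v, hv⟩ := Option.isSome_iff_exists.mp hxr
          rw [PySem.Dict.contains_eq_isSome_get?, hmonoF x v hv]; rfl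
        · exact hcompF x hx' hxok


-- ---- pass 2: A's interleaved low-point floods = B's label lookups ----
def pvP2A (g : List (List Int)) :
    (PySem.Set (Int × Int) × List Int) → (Int × Int) → (PySem.Set (Int × Int) × List Int) :=
  fun st c =>
    if pvIsLowA g c.1 c.2 then
      let r := pvFloodA g (4 * (pvCells g).length + 1) st.1 [c] 0
      (r.1, st.2 ++ [r.2])
    else st

def pvP2B (g : List (List Int)) (L : PySem.Dict (Int × Int) Int) (sizes : List Int) :
    (PySem.Set Int × List Int) → (Int × Int) → (PySem.Set Int × List Int) :=
  fun st c =>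
    if pvIsLowB g c.1 c.2 then
      let lid := L.getD c (-1)
      if lid = -1 ∨ PySem.Set.contains st.1 lid then (st.1, st.2 ++ [0])
      else (PySem.Set.add st.1 lid, st.2 ++ [PySem.List.pyGetD sizes lid 0])
    else st

theorem pvFloodA_one {g : List (List Int)} {f : Nat} {V : PySem.Set (Int × Int)}
    {c : Int × Int} {n : Int} (hcg : pvInGrid g c)
    (hsk : pvVal g c = 9 ∨ PySem.Set.contains V c = true) :
    pvFloodA g (f + 1) V [c] n = (V, n) := by
  obtain ⟨hrow, hval⟩ := pvGet_resolve hcg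
  simp only [pvFloodA, hrow, hval]
  rw [if_pos hsk]

theorem pvPass2 {g : List (List Int)} (hPre : Pre_basins g) {L : PySem.Dict (Int × Int) Int}
    {sizes : List Int} (hinv : PvInv1 g L sizes)
    (hcomp : ∀ c, pvOk g c → L.contains c = true) :
    ∀ (l : List (Int × Int)) (V : PySem.Set (Int × Int)) (seen : PySem.Set Int)
      (out : List Int),
      (∀ c ∈ l, pvInGrid g c) → V.Nodup →
      (∀ x, x ∈ V ↔ ∃ v, L.get? x = some v ∧ v ∈ seen) →
      (l.foldl (pvP2A g) (V, out)).2 = (l.foldl (pvP2B g L sizes) (seen, out)).2 := by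
  intro l
  induction l with
  | nil => intro V seen out _ _ _; rfl
  | cons c t ih =>
    intro V seen out hl hVnd hlink
    have hcg : pvInGrid g c := hl c (List.mem_cons_self ..)
    have hlt : ∀ x ∈ t, pvInGrid g x := fun x hx => hl x (List.mem_cons_of_mem _ hx)
    rw [List.foldl_cons, List.foldl_cons]
    cases hlow : pvIsLowA g c.1 c.2 with
    | false =>
      have hlowB : pvIsLowB g c.1 c.2 = false := by
        rw [← pvIsLow_eq hPre (by cases c; exact hcg)]; exact hlow
      have hA : pvP2A g (V, out) c = (V, out) := by
        unfold pvP2A; rw [hlow]; rfl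
      have hB : pvP2B g L sizes (seen, out) c = (seen, out) := by
        unfold pvP2B; rw [hlowB]; rfl
      rw [hA, hB]; exact ih V seen out hlt hVnd hlink
    | true =>
      have hlowB : pvIsLowB g c.1 c.2 = true := by
        rw [← pvIsLow_eq hPre (by cases c; exact hcg)]; exact hlow
      cases hget : L.get? c with
      | none =>
        have hnok : ¬ pvOk g c := by
          intro hok
          have := hcomp c hok
          rw [PySem.Dict.contains_eq_isSome_get?, hget] at this
          simp at this
        have h9 : pvVal g c = 9 := by
          by_contra h
          exact hnok ⟨hcg, h⟩
        have hA : pvP2A g (V, out) c = (V, out ++ [0]) := by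
          unfold pvP2A
          rw [hlow, if_pos rfl, pvFloodA_one hcg (Or.inl h9)]
        have hgd : L.getD c (-1) = -1 := by rw [PySem.Dict.getD_eq_get?_getD, hget]; rfl
        have hB : pvP2B g L sizes (seen, out) c = (seen, out ++ [0]) := by
          unfold pvP2B
          rw [hlowB, if_pos rfl]
          simp only [hgd]
          simp
        rw [hA, hB]
        exact ih V seen (out ++ [0]) hlt hVnd hlink
      | some v =>
        have hv0 : 0 ≤ v := hinv.lo c v hget
        have hgd : L.getD c (-1) = v := by rw [PySem.Dict.getD_eq_get?_getD, hget]; rfl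
        have hokc : pvOk g c := hinv.ok c v hget
        by_cases hseen : v ∈ seen
        · have hcV : c ∈ V := (hlink c).mpr ⟨v, hget, hseen⟩
          have hA : pvP2A g (V, out) c = (V, out ++ [0]) := by
            unfold pvP2A
            rw [hlow, if_pos rfl,
              pvFloodA_one hcg (Or.inr ((PySem.Set.contains_iff ..).mpr hcV))]
          have hB : pvP2B g L sizes (seen, out) c = (seen, out ++ [0]) := by
            unfold pvP2B
            rw [hlowB, if_pos rfl]
            simp only [hgd]
            rw [if_pos (Or.inr ((PySem.Set.contains_iff ..).mpr hseen))]
          rw [hA, hB]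
          exact ih V seen (out ++ [0]) hlt hVnd hlink
        · have hcV : c ∉ V := by
            intro hc
            obtain ⟨v', hv', hs'⟩ := (hlink c).mp hc
            rw [hget] at hv'
            exact hseen ((Option.some.inj hv') ▸ hs')
          have hVok : ∀ x ∈ V, pvOk g x := by
            intro x hx
            obtain ⟨v', hv', _⟩ := (hlink x).mp hx
            exact hinv.ok x v' hv'
          have hVcl : ∀ x ∈ V, ∀ d, pvStep g x d → d ∈ V := by
            intro x hx d hd
            obtain ⟨v', hv', hs'⟩ := (hlink x).mp hx
            exact (hlink d).mpr
              ⟨v', hinv.const x v' hv' d (Relation.ReflTransGen.single hd), hs'⟩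
          obtain ⟨rnd, rmem, rok, rcl, rsz, rfilt⟩ :=
            pvFloodA_run (n := 0) (fuel := 4 * (pvCells g).length + 1) hPre hVnd hVok hVcl
              hokc hcV
              (by
                have := List.countP_le_length (l := pvCells g)
                  (p := fun x => !(PySem.Set.contains V x))
                omega)
          set r := pvFloodA g (4 * (pvCells g).length + 1) V [c] 0 with hr
          obtain ⟨Lst, Lnd, Lmem, hpy⟩ := hinv.size c v hget
          have hlen : (r.1.filter (fun x => !(PySem.Set.contains V x))).length = Lst.length := by
            apply pvLength_eq_of_mem_iff (rnd.filter _) Lnd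
            intro x; rw [rfilt x, Lmem x]
          have hemitA : r.2 = (Lst.length : Int) := by rw [rsz, hlen]; simp
          have hemitB : PySem.List.pyGetD sizes v 0 = (Lst.length : Int) := by
            simp [PySem.List.pyGetD, hpy]
          have hA : pvP2A g (V, out) c = (r.1, out ++ [r.2]) := by
            unfold pvP2A
            rw [hlow, if_pos rfl]
          have hB : pvP2B g L sizes (seen, out) c =
              (PySem.Set.add seen v, out ++ [PySem.List.pyGetD sizes v 0]) := by
            unfold pvP2B
            rw [hlowB, if_pos rfl]
            simp only [hgd]
            rw [if_neg (by
              rintro (h | h)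
              · omega
              · exact hseen ((PySem.Set.contains_iff ..).mp h))]
          rw [hA, hB, hemitA, hemitB]
          apply ih r.1 (PySem.Set.add seen v) (out ++ [(Lst.length : Int)]) hlt rnd
          intro x
          rw [rmem x]
          constructor
          · rintro (hx | hx)
            · obtain ⟨v', hv', hs'⟩ := (hlink x).mp hx
              exact ⟨v', hv', (PySem.Set.mem_add ..).mpr (Or.inl hs')⟩
            · exact ⟨v, hinv.const c v hget x hx, (PySem.Set.mem_add ..).mpr (Or.inr rfl)⟩
          · rintro ⟨v', hv', hs'⟩
            rcases (PySem.Set.mem_add ..).mp hs' with hs'' | rfl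
            · exact Or.inl ((hlink x).mpr ⟨v', hv', hs''⟩)
            · exact Or.inr (hinv.inj c x v' hget hv')

-- ===== VERDICT (by name: the statement is the Claim_ definition above) =====
theorem basins_spec : Claim_equal_basins := by
  intro contents hDom hPre
  unfold Spec_basins
  have hcells : ∀ c ∈ pvCells contents, pvInGrid contents c := fun c hc => pvMem_cells.mp hc
  have hinv0 : PvInv1 contents PySem.Dict.empty [] := by
    refine ⟨?_, ?_, ?_, ?_, ?_, ?_, ?_⟩ <;>
      first
        | simp [PySem.Dict.nodup_keys_empty]
        | (intro c v h; rw [PySem.Dict.get?_empty] at h; exact Option.noConfusion h)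
        | (intro c d v h; rw [PySem.Dict.get?_empty] at h; exact Option.noConfusion h)
  obtain ⟨hinv, hmono, hcomp⟩ :=
    pvPass1 hPre (pvCells contents) PySem.Dict.empty [] hcells hinv0
  have hcompAll : ∀ c, pvOk contents c →
      ((pvCells contents).foldl (pvP1F contents) (PySem.Dict.empty, [])).1.contains c = true :=
    fun c hc => hcomp c (pvMem_cells.mpr hc.1) hc
  have h2 := pvPass2 hPre hinv hcompAll (pvCells contents)
    PySem.Set.empty PySem.Set.empty [] hcells List.nodup_nil (by simp [PySem.Set.empty])
  exact h2
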